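-- pv_equiv track=rewrite | github.com/JorgeIba/Competitive-Programming-Problems | ICPC México 2020 - Repechaje/F.py | centro
-- ===== SOURCE A (Python) =====
-- def centro(n): ## (i, j) -- (k, l)
--   ans = 0
--   for i in range(0,n):
--     for j in range(0,n):
--       for k in range(n, 2*n):
--         for l in range(n, 2*n):
--           ans += abs(i-k)  + abs(j-l)
--   return ans//2
-- ===== SOURCE B (Python) =====
-- def centro(n):
--     # Closed form: for each of the n^2 * n^2 index pairs the distance splits into
--     # coordinates, and the coordinate sums telescope to 2*n^5; halved -> n^5.
--     return max(n, 0) ** 5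
-- ===== Notes on version B (the rewrite author's own statement) =====
-- stated objective: faster
-- what changed: Replaced the quadruple O(n^4) loop summing |i-k|+|j-l| by the closed form max(n,0)**5 obtained by separating coordinates and cancelling the arithmetic-series terms.
import Mathlib
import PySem

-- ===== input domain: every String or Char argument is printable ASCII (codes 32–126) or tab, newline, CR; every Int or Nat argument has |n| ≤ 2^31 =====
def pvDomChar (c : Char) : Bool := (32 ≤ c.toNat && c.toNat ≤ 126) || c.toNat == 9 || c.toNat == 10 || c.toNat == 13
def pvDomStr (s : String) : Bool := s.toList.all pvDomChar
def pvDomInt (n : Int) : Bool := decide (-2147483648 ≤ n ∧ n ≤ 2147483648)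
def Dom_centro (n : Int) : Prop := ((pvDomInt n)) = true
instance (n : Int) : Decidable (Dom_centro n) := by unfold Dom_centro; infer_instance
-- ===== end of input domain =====

-- B replaces A's quadruple loop by the closed form max(n,0)^5 (asymptotically faster).

-- ===== PORT A =====
def centro (n : Int) : Int :=
  let ans : Int :=
    (PySem.List.pyRange 0 n 1).foldl (fun ans i =>
      (PySem.List.pyRange 0 n 1).foldl (fun ans j =>
        (PySem.List.pyRange n (2*n) 1).foldl (fun ans k =>
          (PySem.List.pyRange n (2*n) 1).foldl (fun ans l =>
            ans + (|i - k| + |j - l|)) ans) ans) ans) 0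
  PySem.Int.floordiv ans 2

-- ===== PORT B =====
def centro_alt (n : Int) : Int := (max n 0) ^ 5

-- ===== PRECONDITION & SPEC =====
def Spec_centro (n : Int) (out : Int) : Prop := out = centro_alt n
instance (n : Int) (out : Int) : Decidable (Spec_centro n out) := by unfold Spec_centro; infer_instance

-- ===== CLAIM (what is proved, stated in full; the proofs are below) =====
def Claim_equal_centro : Prop := ∀ (n : Int), Dom_centro n → Spec_centro n (centro n)

-- ===== LEMMAS AND PROOFS =====

-- A's four nested accumulating loops are the quadruple sum of the summands.
theorem centro_loops_eq_sum (n : Int) :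
    (PySem.List.pyRange 0 n 1).foldl (fun ans i =>
      (PySem.List.pyRange 0 n 1).foldl (fun ans j =>
        (PySem.List.pyRange n (2*n) 1).foldl (fun ans k =>
          (PySem.List.pyRange n (2*n) 1).foldl (fun ans l =>
            ans + (|i - k| + |j - l|)) ans) ans) ans) 0
    = ((PySem.List.pyRange 0 n 1).map (fun i =>
        ((PySem.List.pyRange 0 n 1).map (fun j =>
          ((PySem.List.pyRange n (2*n) 1).map (fun k =>
            ((PySem.List.pyRange n (2*n) 1).map (fun l =>
              |i - k| + |j - l|)).sum)).sum)).sum)).sum := by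
  simp [PySem.List.foldl_add]

-- Sum over a Python step-1 range as a Finset.range sum.
theorem sum_map_pyRange (a b : Int) (f : Int → Int) :
    ((PySem.List.pyRange a b 1).map f).sum = ∑ t ∈ Finset.range (b - a).toNat, f (a + t) := by
  rw [PySem.List.pyRange_one, List.map_map]; rfl

-- The quadruple sum evaluates to 2 * n^5 (the series terms cancel).
theorem quad_sum_eval (m : ℕ) (n : Int) (hm : (m : ℤ) = n) :
    ∑ i ∈ Finset.range m, ∑ j ∈ Finset.range m, ∑ k ∈ Finset.range m, ∑ l ∈ Finset.range m,
      ((|((0:ℤ) + i) - (n + k)|) + (|((0:ℤ) + j) - (n + l)|)) = 2 * n ^ 5 := by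
  have h : ∀ i ∈ Finset.range m, ∀ j ∈ Finset.range m, ∀ k ∈ Finset.range m, ∀ l ∈ Finset.range m,
      ((|((0:ℤ) + i) - (n + k)|) + (|((0:ℤ) + j) - (n + l)|)) = (n + k - i) + (n + l - j) := by
    intro i hi j hj k hk l hl
    simp only [Finset.mem_range] at hi hj
    have h1 : ((0:ℤ) + i) - (n + k) ≤ 0 := by
      have : (i:ℤ) < m := by exact_mod_cast hi
      have : (k:ℤ) ≥ 0 := by positivity
      omega
    have h2 : ((0:ℤ) + j) - (n + l) ≤ 0 := by
      have : (j:ℤ) < m := by exact_mod_cast hj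
      have : (l:ℤ) ≥ 0 := by positivity
      omega
    rw [abs_of_nonpos h1, abs_of_nonpos h2]; ring
  rw [Finset.sum_congr rfl (fun i hi => Finset.sum_congr rfl (fun j hj => Finset.sum_congr rfl
    (fun k hk => Finset.sum_congr rfl (fun l hl => h i hi j hj k hk l hl))))]
  simp [Finset.sum_add_distrib, Finset.sum_sub_distrib, Finset.sum_const, mul_comm]
  subst hm
  ring_nf
  simp only [Finset.sum_add_distrib, Finset.sum_const, ← Finset.mul_sum, nsmul_eq_mul,
    Finset.card_range]
  generalize (∑ x ∈ Finset.range m, (x:ℤ)) = S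
  ring

-- ===== VERDICT (by name: the statement is the Claim_ definition above) =====
theorem centro_spec : Claim_equal_centro := by
  intro n _
  unfold Spec_centro centro centro_alt
  rw [centro_loops_eq_sum]
  by_cases hn : n ≤ 0
  · rw [PySem.List.pyRange_one_eq_nil hn]
    simp [PySem.Int.floordiv, max_eq_right hn]
  · push Not at hn
    have hm : ((n.toNat : ℤ)) = n := Int.toNat_of_nonneg hn.le
    simp only [sum_map_pyRange]
    have e1 : (n - 0).toNat = n.toNat := by omega
    have e2 : (2 * n - n).toNat = n.toNat := by omega
    rw [e1, e2, quad_sum_eval n.toNat n hm]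
    rw [PySem.Int.floordiv_eq_ediv_of_pos (by norm_num)]
    rw [Int.mul_ediv_cancel_left _ (by norm_num : (2:ℤ) ≠ 0)]
    have : max n 0 = n := max_eq_left hn.le
    rw [this]
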